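-- pv_equiv track=rewrite | github.com/kimjiwonpg98/TIL | coding-test/프로그래머스/level2/더맵게.py | solution
-- ===== SOURCE A (Python) =====
-- import heapq
--
-- def solution(scoville, K):
--     heap = []
--
--     for num in scoville:
--         heapq.heappush(heap, num)
--
--     count = 0
--
--     while heap[0] < K:
--         try:
--             heapq.heappush(heap, heapq.heappop(heap) + (heapq.heappop(heap) * 2))
--         except IndexError:
--             return -1
--         count += 1
--
--
--     return count
-- ===== SOURCE B (Python) =====
-- def _insort(s, x):
--     # linear insertion keeping s sorted (insert after equal elements)
--     i = 0
--     while i < len(s) and s[i] <= x: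
--         i += 1
--     s.insert(i, x)
--
--
-- def solution(scoville, K):
--     s = sorted(scoville)  # fresh sorted copy; scoville itself is not mutated
--     count = 0
--     while s[0] < K:
--         if len(s) < 2:
--             return -1
--         first = s.pop(0)
--         second = s.pop(0)
--         _insort(s, first + second * 2)
--         count += 1
--     return count
-- ===== Notes on version B (the rewrite author's own statement) =====
-- stated objective: alternative
-- what changed: Replaces the binary heap (heapq push/pop) by a sorted list used as the priority structure: pop the two smallest from the front and reinsert the merged value with an ordered insertion, with an explicit len<2 check instead of catching IndexError.
import Mathlib
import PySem

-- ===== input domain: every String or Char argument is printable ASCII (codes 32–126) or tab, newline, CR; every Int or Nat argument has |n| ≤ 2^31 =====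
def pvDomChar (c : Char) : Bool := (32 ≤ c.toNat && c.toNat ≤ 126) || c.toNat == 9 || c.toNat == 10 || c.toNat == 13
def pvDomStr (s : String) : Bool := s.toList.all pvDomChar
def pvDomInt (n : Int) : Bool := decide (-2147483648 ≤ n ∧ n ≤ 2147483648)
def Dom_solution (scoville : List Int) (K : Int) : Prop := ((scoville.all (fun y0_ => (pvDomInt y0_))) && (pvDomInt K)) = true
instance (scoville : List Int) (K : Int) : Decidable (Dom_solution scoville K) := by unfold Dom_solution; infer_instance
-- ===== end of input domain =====

-- B replaces A's binary heap by a sorted list used as the priority structure (alternative decomposition, not faster).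


-- ===== PORT A =====
-- Hand model of Python's heapq on an Int heap.  Exact because the only observables A
-- produces (heap[0], the popped values, and hence the returned count) are determined by
-- the MULTISET of heap elements: heap[0] and heappop both yield the minimum element, and
-- for Int ties equal values are indistinguishable.  So the heap is carried as the list of
-- its elements: heappush adds the element, heappop removes and returns a minimum.
def heappushA (h : List Int) (x : Int) : List Int := x :: h

def heappopA (h : List Int) : Option (Int × List Int) :=
  match h.min? with
  | none => none                      -- IndexError: pop from empty heap
  | some m => some (m, h.erase m)

-- the 'while heap[0] < K' loop of A; count is the accumulator.
-- The -2 branch is unreachable once the heap is nonempty (each iteration keeps ≥ 1 element).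
def loopA (h : List Int) (K : Int) (count : Int) : Int :=
  match hm : h.min? with
  | none => -2                        -- heap[0] on an empty heap: IndexError (excluded by Pre_)
  | some m =>
    if m < K then
      match hp : heappopA (h.erase m) with       -- second heappop (first popped m)
      | none => -1                               -- IndexError caught: return -1
      | some (m2, rest) => loopA (heappushA rest (m + m2 * 2)) K (count + 1)
    else count
termination_by h.length
decreasing_by
  · have hmem : m ∈ h := List.min?_mem hm
    unfold heappopA at hp
    cases h2 : (h.erase m).min? with
    | none => rw [h2] at hp; exact absurd hp (by simp)
    | some v =>
      rw [h2] at hp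
      simp only [Option.some.injEq, Prod.mk.injEq] at hp
      have hmem2 : v ∈ h.erase m := List.min?_mem h2
      have l1 : (h.erase m).length = h.length - 1 := List.length_erase_of_mem hmem
      have l2 : ((h.erase m).erase v).length = (h.erase m).length - 1 :=
        List.length_erase_of_mem hmem2
      rw [← hp.2]
      have hpos : 0 < h.length := List.length_pos_of_mem hmem
      have hpos2 : 0 < (h.erase m).length := List.length_pos_of_mem hmem2
      simp only [heappushA, List.length_cons]
      omega

def solution (scoville : List Int) (K : Int) : Int :=
  let heap := scoville.foldl heappushA []
  loopA heap K 0

-- ===== PORT B =====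
-- linear ordered insertion (_insort in Source B): insert x after the elements ≤ x
def insortB : List Int → Int → List Int
  | [], x => [x]
  | y :: ys, x => if y ≤ x then y :: insortB ys x else x :: y :: ys

-- the 'while s[0] < K' loop of B over the sorted list s
def loopB (s : List Int) (K : Int) (count : Int) : Int :=
  match s with
  | [] => -2                          -- s[0]: IndexError (excluded by Pre_)
  | [a] => if a < K then -1 else count       -- len(s) < 2
  | a :: b :: rest =>
    if a < K then loopB (insortB rest (a + b * 2)) K (count + 1) else count
termination_by s.length
decreasing_by
  have : (insortB rest (a + b * 2)).length = rest.length + 1 := by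
    induction rest with
    | nil => simp [insortB]
    | cons z zs ih => simp only [insortB]; split <;> simp [ih]
  simp [this]

def solution_alt (scoville : List Int) (K : Int) : Int :=
  loopB (PySem.List.sorted scoville (fun x => x) false) K 0

-- ===== PRECONDITION & SPEC =====
-- Pre_ excludes only the empty list, on which A (heap[0]) raises IndexError (B raises there too).
def Pre_solution (scoville : List Int) (K : Int) : Prop := scoville ≠ []
instance (scoville : List Int) (K : Int) : Decidable (Pre_solution scoville K) := by
  unfold Pre_solution; infer_instance

def pvWitness_solution : List Int × Int := ([1, 2, 3, 9, 10, 12], 7)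

def Spec_solution (scoville : List Int) (K : Int) (out : Int) : Prop := out = solution_alt scoville K
instance (scoville : List Int) (K : Int) (out : Int) : Decidable (Spec_solution scoville K out) := by unfold Spec_solution; infer_instance

-- ===== CLAIM (what is proved, stated in full; the proofs are below) =====
def Claim_equal_solution : Prop := ∀ (scoville : List Int) (K : Int), Dom_solution scoville K → Pre_solution scoville K → Spec_solution scoville K (solution scoville K)

-- ===== LEMMAS AND PROOFS =====

theorem insortB_perm (s : List Int) (x : Int) : (insortB s x).Perm (x :: s) := by
  induction s with
  | nil => simp [insortB]
  | cons y ys ih =>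
    simp only [insortB]
    split
    · exact ((ih.cons y).trans (List.Perm.swap x y ys))
    · exact List.Perm.refl _

theorem insortB_sorted (s : List Int) (x : Int) (hs : s.Pairwise (· ≤ ·)) :
    (insortB s x).Pairwise (· ≤ ·) := by
  induction s with
  | nil => simp [insortB]
  | cons y ys ih =>
    simp only [insortB]
    rcases List.pairwise_cons.mp hs with ⟨hy, hys⟩
    split
    · rename_i hyx
      refine List.pairwise_cons.mpr ⟨?_, ih hys⟩
      intro z hz
      rcases List.mem_cons.mp ((insortB_perm ys x).mem_iff.mp hz) with h | h
      · exact h ▸ hyx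
      · exact hy z h
    · rename_i hyx
      refine List.pairwise_cons.mpr ⟨?_, hs⟩
      intro z hz
      rcases List.mem_cons.mp hz with h | h
      · omega
      · exact le_trans (by omega) (hy z h)

theorem min?_of_perm_sorted (h : List Int) (a : Int) (t : List Int)
    (hp : h.Perm (a :: t)) (hs : (a :: t).Pairwise (· ≤ ·)) : h.min? = some a := by
  rw [List.min?_eq_some_iff]
  refine ⟨hp.mem_iff.mpr (by simp), ?_⟩
  intro x hx
  rcases List.mem_cons.mp (hp.mem_iff.mp hx) with h1 | h1
  · omega
  · exact (List.pairwise_cons.mp hs).1 x h1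

-- main loop correspondence: A's heap (as a multiset) against B's sorted list
theorem loop_eq (n : ℕ) : ∀ (h s : List Int) (K count : Int), h.length ≤ n →
    h.Perm s → s.Pairwise (· ≤ ·) → loopA h K count = loopB s K count := by
  induction n with
  | zero =>
    intro h s K count hn hp _
    have h0 : h = [] := List.length_eq_zero_iff.mp (by omega)
    have s0 : s = [] := (h0 ▸ hp).symm.eq_nil
    subst h0; subst s0
    simp [loopA, loopB]
  | succ n ih =>
    intro h s K count hn hp hs
    rcases s with _ | ⟨a, t⟩
    · have h0 : h = [] := hp.eq_nil
      subst h0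
      simp [loopA, loopB]
    · have hmin : h.min? = some a := min?_of_perm_sorted h a t hp hs
      have hmem : a ∈ h := hp.mem_iff.mpr (by simp)
      have herase : (h.erase a).Perm t :=
        (List.perm_cons a).mp (((List.perm_cons_erase hmem).symm).trans hp)
      rw [loopA]
      split
      · rename_i heq; rw [hmin] at heq; simp at heq
      · rename_i m heq
        rw [hmin] at heq
        injection heq with h3
        subst h3
        rcases t with _ | ⟨b, t2⟩
        · have he0 : h.erase a = [] := herase.eq_nil
          have hpop : heappopA (h.erase a) = none := by simp [heappopA, he0]
          rw [loopB]
          by_cases hK : a < K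
          · rw [if_pos hK, if_pos hK]
            split
            · rfl
            · rename_i m2 rest heq2; rw [hpop] at heq2; simp at heq2
          · rw [if_neg hK, if_neg hK]
        · have hs2 : (b :: t2).Pairwise (· ≤ ·) := (List.pairwise_cons.mp hs).2
          have hmin2 : (h.erase a).min? = some b := min?_of_perm_sorted _ b t2 herase hs2
          have hmemb : b ∈ h.erase a := herase.mem_iff.mpr (by simp)
          have herase2 : ((h.erase a).erase b).Perm t2 :=
            (List.perm_cons b).mp (((List.perm_cons_erase hmemb).symm).trans herase)
          have hpop : heappopA (h.erase a) = some (b, (h.erase a).erase b) := by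
            simp [heappopA, hmin2]
          rw [loopB]
          by_cases hK : a < K
          · rw [if_pos hK, if_pos hK]
            split
            · rename_i heq2; rw [hpop] at heq2; simp at heq2
            · rename_i m2 rest heq2
              rw [hpop] at heq2
              simp only [Option.some.injEq, Prod.mk.injEq] at heq2
              obtain ⟨h4, h5⟩ := heq2
              subst h4; subst h5
              have hlen : (heappushA ((h.erase a).erase b) (a + b * 2)).length ≤ n := by
                have l1 : (h.erase a).length = h.length - 1 := List.length_erase_of_mem hmem
                have l2 : ((h.erase a).erase b).length = (h.erase a).length - 1 :=
                  List.length_erase_of_mem hmemb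
                have : 0 < (h.erase a).length := List.length_pos_of_mem hmemb
                simp only [heappushA, List.length_cons]
                omega
              exact ih _ _ K (count + 1) hlen
                ((herase2.cons (a + b * 2)).trans (insortB_perm t2 (a + b * 2)).symm)
                (insortB_sorted _ _ (List.pairwise_cons.mp hs2).2)
          · rw [if_neg hK, if_neg hK]

theorem foldl_heappushA_perm (scoville acc : List Int) :
    (scoville.foldl heappushA acc).Perm (acc ++ scoville) := by
  induction scoville generalizing acc with
  | nil => simp
  | cons x xs ih =>
    simp only [List.foldl_cons]
    exact (ih (heappushA acc x)).trans List.perm_middle.symm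

-- ===== VERDICT (by name: the statement is the Claim_ definition above) =====
theorem solution_spec : Claim_equal_solution := by
  intro scoville K _ _
  unfold Spec_solution solution solution_alt
  have hperm : (scoville.foldl heappushA []).Perm (PySem.List.sorted scoville (fun x => x) false) := by
    refine ((foldl_heappushA_perm scoville []).trans ?_).trans (PySem.List.sorted_perm ..).symm
    simp
  exact loop_eq (scoville.foldl heappushA []).length _ _ K 0 le_rfl hperm
    (by simpa using PySem.List.sorted_pairwise scoville (fun x => x))
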